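-- pv_equiv track=rewrite | github.com/AlifSrSE/ProblemSolves | 253A-boysAndGirls.py | solve
-- ===== SOURCE A (Python) =====
-- def solve(num_boys, num_girls):
--     result = []
--     while num_boys > 0 or num_girls > 0:
--         if num_boys > num_girls:
--             if len(result) == 0 or result[-1] != 'B':
--                 result.append('B')
--                 num_boys -= 1
--             else:
--                 if num_girls > 0:
--                     result.append('G')
--                     num_girls -= 1
--                 else:
--                     result.append('B')
--                     num_boys -= 1
--         else:
--             if len(result) == 0 or result[-1] != 'G':
--                 result.append('G')
--                 num_girls -= 1
--             else:
--                 if num_boys > 0: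
--                     result.append('B')
--                     num_boys -= 1
--                 else:
--                     result.append('G')
--                     num_girls -= 1
--     return ''.join(result)
-- ===== SOURCE B (Python) =====
-- def solve(num_boys, num_girls):
--     b = max(num_boys, 0)
--     g = max(num_girls, 0)
--     if b > g:
--         first, second, hi, lo = 'B', 'G', b, g
--     else:
--         first, second, hi, lo = 'G', 'B', g, b
--     return (first + second) * lo + first * (hi - lo)
-- ===== Notes on version B (the rewrite author's own statement) =====
-- stated objective: faster
-- what changed: Replaces A's per-character while loop that inspects result[-1] and branches each step with a closed-form two-phase construction: repeat the (majority, minority) pair min-count times, then append the surplus of the majority gender.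
import Mathlib
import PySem

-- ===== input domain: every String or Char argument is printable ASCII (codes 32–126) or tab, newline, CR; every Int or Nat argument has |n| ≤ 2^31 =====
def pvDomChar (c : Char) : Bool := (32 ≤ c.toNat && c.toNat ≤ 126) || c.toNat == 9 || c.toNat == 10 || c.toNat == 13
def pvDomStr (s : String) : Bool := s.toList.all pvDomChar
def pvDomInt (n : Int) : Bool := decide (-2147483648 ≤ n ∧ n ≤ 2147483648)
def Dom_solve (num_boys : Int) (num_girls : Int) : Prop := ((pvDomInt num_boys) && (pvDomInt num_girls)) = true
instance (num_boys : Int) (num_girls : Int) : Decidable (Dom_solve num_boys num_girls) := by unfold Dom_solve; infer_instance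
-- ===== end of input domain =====

-- B replaces A's per-character loop (which inspects result[-1] each step) by a closed-form
-- two-phase construction: (majority minority) pair repeated min-count times, then the surplus
-- of the majority gender (measurably faster: no per-character loop).

-- ===== PORT A =====
-- the while loop of A: state (result, num_boys, num_girls). The Nat argument is only a
-- totality guard (each iteration of A's loop shrinks num_boys.toNat + num_girls.toNat by one,
-- so with fuel = that sum the guard never fires; all branch tests are A's own).
def solveLoop : Nat → List Char → Int → Int → List Char
  | 0, result, _, _ => result
  | fuel + 1, result, num_boys, num_girls =>
    if num_boys > 0 ∨ num_girls > 0 then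
      if num_boys > num_girls then
        if result.length = 0 ∨ PySem.List.pyGet? result (-1) ≠ some 'B' then
          solveLoop fuel (result ++ ['B']) (num_boys - 1) num_girls
        else
          if num_girls > 0 then
            solveLoop fuel (result ++ ['G']) num_boys (num_girls - 1)
          else
            solveLoop fuel (result ++ ['B']) (num_boys - 1) num_girls
      else
        if result.length = 0 ∨ PySem.List.pyGet? result (-1) ≠ some 'G' then
          solveLoop fuel (result ++ ['G']) num_boys (num_girls - 1)
        else
          if num_boys > 0 then
            solveLoop fuel (result ++ ['B']) (num_boys - 1) num_girls
          else
            solveLoop fuel (result ++ ['G']) num_boys (num_girls - 1)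
    else result

def solve (num_boys : Int) (num_girls : Int) : String :=
  String.ofList (solveLoop (num_boys.toNat + num_girls.toNat) [] num_boys num_girls)

-- ===== PORT B =====
-- (first + second) * lo : the two-character string repeated lo times
def pairRep (c d : Char) : Nat → List Char
  | 0 => []
  | n + 1 => c :: d :: pairRep c d n

def solve_alt (num_boys : Int) (num_girls : Int) : String :=
  let b := max num_boys 0
  let g := max num_girls 0
  if b > g then
    String.ofList (pairRep 'B' 'G' g.toNat ++ List.replicate (b - g).toNat 'B')
  else
    String.ofList (pairRep 'G' 'B' b.toNat ++ List.replicate (g - b).toNat 'G')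

-- ===== PRECONDITION & SPEC =====
def Spec_solve (num_boys : Int) (num_girls : Int) (out : String) : Prop := out = solve_alt num_boys num_girls
instance (num_boys : Int) (num_girls : Int) (out : String) : Decidable (Spec_solve num_boys num_girls out) := by unfold Spec_solve; infer_instance

-- ===== CLAIM (what is proved, stated in full; the proofs are below) =====
def Claim_equal_solve : Prop := ∀ (num_boys : Int) (num_girls : Int), Dom_solve num_boys num_girls → Spec_solve num_boys num_girls (solve num_boys num_girls)

-- ===== LEMMAS AND PROOFS =====

lemma last_append (acc : List Char) (c : Char) :
    PySem.List.pyGet? (acc ++ [c]) (-1) = some c := by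
  rw [PySem.List.pyGet?_neg_one]; simp

-- the loop's "result[-1] == x" test is settled when the last element is known
lemma pvCondFalse (acc : List Char) (c : Char) (hlast : PySem.List.pyGet? acc (-1) = some c)
    (hne : acc ≠ []) : ¬(acc.length = 0 ∨ PySem.List.pyGet? acc (-1) ≠ some c) := by
  simp [hlast, List.length_eq_zero_iff, hne]

-- only boys remain, last char is 'B': the loop emits b.toNat more 'B's
lemma onlyB : ∀ (fuel : Nat) (acc : List Char) (b g : Int),
    b.toNat + g.toNat ≤ fuel → 0 ≤ b → g ≤ 0 →
    PySem.List.pyGet? acc (-1) = some 'B' → acc ≠ [] →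
    solveLoop fuel acc b g = acc ++ List.replicate b.toNat 'B' := by
  intro fuel
  induction fuel with
  | zero =>
    intro acc b g hf hb hg _ _
    rw [(show b.toNat = 0 by omega)]
    simp [solveLoop]
  | succ k ih =>
    intro acc b g hf hb hg hlast hne
    by_cases hbpos : b > 0
    · rw [solveLoop, if_pos (Or.inl hbpos), if_pos (show b > g by omega),
        if_neg (pvCondFalse acc 'B' hlast hne), if_neg (show ¬ g > 0 by omega)]
      rw [ih (acc ++ ['B']) (b - 1) g (by omega) (by omega) hg (last_append acc 'B') (by simp)]
      rw [(show b.toNat = (b - 1).toNat + 1 by omega)]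
      simp [List.replicate_succ]
    · rw [solveLoop, if_neg (show ¬(b > 0 ∨ g > 0) by omega), (show b.toNat = 0 by omega)]
      simp

-- only girls remain, last char is 'G': the loop emits g.toNat more 'G's
lemma onlyG : ∀ (fuel : Nat) (acc : List Char) (b g : Int),
    b.toNat + g.toNat ≤ fuel → 0 ≤ g → b ≤ 0 →
    PySem.List.pyGet? acc (-1) = some 'G' → acc ≠ [] →
    solveLoop fuel acc b g = acc ++ List.replicate g.toNat 'G' := by
  intro fuel
  induction fuel with
  | zero =>
    intro acc b g hf hg hb _ _
    rw [(show g.toNat = 0 by omega)]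
    simp [solveLoop]
  | succ k ih =>
    intro acc b g hf hg hb hlast hne
    by_cases hgpos : g > 0
    · rw [solveLoop, if_pos (Or.inr hgpos), if_neg (show ¬ b > g by omega),
        if_neg (pvCondFalse acc 'G' hlast hne), if_neg (show ¬ b > 0 by omega)]
      rw [ih (acc ++ ['G']) b (g - 1) (by omega) (by omega) hb (last_append acc 'G') (by simp)]
      rw [(show g.toNat = (g - 1).toNat + 1 by omega)]
      simp [List.replicate_succ]
    · rw [solveLoop, if_neg (show ¬(b > 0 ∨ g > 0) by omega), (show g.toNat = 0 by omega)]
      simp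

-- boys ahead, last char 'B': alternating 'G','B' pairs then the surplus of 'B's
lemma runB : ∀ (n : Nat) (fuel : Nat) (acc : List Char) (b g : Int), g.toNat = n →
    b.toNat + g.toNat ≤ fuel → 0 ≤ g → g ≤ b →
    PySem.List.pyGet? acc (-1) = some 'B' → acc ≠ [] →
    solveLoop fuel acc b g = acc ++ pairRep 'G' 'B' n ++ List.replicate (b - g).toNat 'B' := by
  intro n
  induction n with
  | zero =>
    intro fuel acc b g hn hf hg hgb hlast hne
    have hg0 : g = 0 := by omega
    subst hg0
    rw [onlyB fuel acc b 0 (by omega) (by omega) le_rfl hlast hne]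
    simp [pairRep]
  | succ k ih =>
    intro fuel acc b g hn hf hg hgb hlast hne
    have hgpos : g > 0 := by omega
    have hbpos : b > 0 := by omega
    obtain ⟨f, rfl⟩ : ∃ f, fuel = f + 1 + 1 := ⟨fuel - 2, by omega⟩
    -- first step: append 'G' (whether b > g or b = g)
    have step1 : solveLoop (f + 1 + 1) acc b g = solveLoop (f + 1) (acc ++ ['G']) b (g - 1) := by
      by_cases hbg : b > g
      · rw [solveLoop, if_pos (Or.inl hbpos), if_pos hbg,
          if_neg (pvCondFalse acc 'B' hlast hne), if_pos hgpos]
      · rw [solveLoop, if_pos (Or.inl hbpos), if_neg hbg,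
          if_pos (Or.inr (show PySem.List.pyGet? acc (-1) ≠ some 'G' by simp [hlast]))]
    -- second step: append 'B'
    have step2 : solveLoop (f + 1) (acc ++ ['G']) b (g - 1) =
        solveLoop f (acc ++ ['G', 'B']) (b - 1) (g - 1) := by
      rw [solveLoop, if_pos (Or.inl hbpos), if_pos (show b > g - 1 by omega),
        if_pos (Or.inr (show PySem.List.pyGet? (acc ++ ['G']) (-1) ≠ some 'B' by simp))]
      simp
    rw [step1, step2,
      ih f (acc ++ ['G', 'B']) (b - 1) (g - 1) (by omega) (by omega) (by omega) (by omega)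
        (by simpa using last_append (acc ++ ['G']) 'B') (by simp)]
    rw [(show ((b - 1) - (g - 1)).toNat = (b - g).toNat by omega)]
    simp [pairRep]

-- girls ahead or tied, last char 'G': alternating 'B','G' pairs then the surplus of 'G's
lemma runG : ∀ (n : Nat) (fuel : Nat) (acc : List Char) (b g : Int), b.toNat = n →
    b.toNat + g.toNat ≤ fuel → 0 ≤ b → b ≤ g →
    PySem.List.pyGet? acc (-1) = some 'G' → acc ≠ [] →
    solveLoop fuel acc b g = acc ++ pairRep 'B' 'G' n ++ List.replicate (g - b).toNat 'G' := by
  intro n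
  induction n with
  | zero =>
    intro fuel acc b g hn hf hb hbg hlast hne
    have hb0 : b = 0 := by omega
    subst hb0
    rw [onlyG fuel acc 0 g (by omega) (by omega) le_rfl hlast hne]
    simp [pairRep]
  | succ k ih =>
    intro fuel acc b g hn hf hb hbg hlast hne
    have hbpos : b > 0 := by omega
    have hgpos : g > 0 := by omega
    obtain ⟨f, rfl⟩ : ∃ f, fuel = f + 1 + 1 := ⟨fuel - 2, by omega⟩
    have step1 : solveLoop (f + 1 + 1) acc b g = solveLoop (f + 1) (acc ++ ['B']) (b - 1) g := by
      rw [solveLoop, if_pos (Or.inl hbpos), if_neg (show ¬ b > g by omega),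
        if_neg (pvCondFalse acc 'G' hlast hne), if_pos hbpos]
    have step2 : solveLoop (f + 1) (acc ++ ['B']) (b - 1) g =
        solveLoop f (acc ++ ['B', 'G']) (b - 1) (g - 1) := by
      rw [solveLoop, if_pos (Or.inr hgpos), if_neg (show ¬ b - 1 > g by omega),
        if_pos (Or.inr (show PySem.List.pyGet? (acc ++ ['B']) (-1) ≠ some 'G' by simp))]
      simp
    rw [step1, step2,
      ih f (acc ++ ['B', 'G']) (b - 1) (g - 1) (by omega) (by omega) (by omega) (by omega)
        (by simpa using last_append (acc ++ ['B']) 'G') (by simp)]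
    rw [(show ((g - 1) - (b - 1)).toNat = (g - b).toNat by omega)]
    simp [pairRep]

-- pulling the leading majority character through the alternating pairs
lemma swapShift (c d : Char) : ∀ (k m : Nat),
    c :: (pairRep d c k ++ List.replicate m c) = pairRep c d k ++ List.replicate (m + 1) c := by
  intro k
  induction k with
  | zero => intro m; simp [pairRep, List.replicate_succ]
  | succ j ih =>
    intro m
    simp only [pairRep, List.cons_append]
    rw [ih]

-- ===== VERDICT (by name: the statement is the Claim_ definition above) =====
theorem solve_spec : Claim_equal_solve := by
  intro b g _
  unfold Spec_solve solve solve_alt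
  by_cases hrun : b > 0 ∨ g > 0
  · obtain ⟨f, hfuel⟩ : ∃ f, b.toNat + g.toNat = f + 1 := ⟨b.toNat + g.toNat - 1, by omega⟩
    rw [hfuel]
    by_cases hbg : b > g
    · -- first char 'B'
      have hstep : solveLoop (f + 1) [] b g = solveLoop f ['B'] (b - 1) g := by
        rw [solveLoop, if_pos hrun, if_pos hbg,
          if_pos (Or.inl (by simp : ([] : List Char).length = 0))]
        simp
      by_cases hg : 0 ≤ g
      · -- alternating run
        rw [hstep, runB g.toNat f ['B'] (b - 1) g rfl (by omega) hg (by omega) (by decide)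
          (by simp)]
        rw [if_pos (show max b 0 > max g 0 by omega), (show max b 0 = b by omega),
          (show max g 0 = g by omega)]
        rw [List.singleton_append, List.cons_append, swapShift 'B' 'G' g.toNat (b - 1 - g).toNat,
          (show (b - 1 - g).toNat + 1 = (b - g).toNat by omega)]
      · -- no girls at all
        rw [hstep, onlyB f ['B'] (b - 1) g (by omega) (by omega) (by omega) (by decide) (by simp)]
        rw [if_pos (show max b 0 > max g 0 by omega), (show max g 0 = 0 by omega),
          (show max b 0 = b by omega)]
        simp only [pairRep, Int.toNat_zero, List.nil_append, List.singleton_append, Int.sub_zero]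
        rw [(show b.toNat = (b - 1).toNat + 1 by omega), List.replicate_succ]
    · -- first char 'G'
      have hgpos : g > 0 := by omega
      have hstep : solveLoop (f + 1) [] b g = solveLoop f ['G'] b (g - 1) := by
        rw [solveLoop, if_pos hrun, if_neg hbg,
          if_pos (Or.inl (by simp : ([] : List Char).length = 0))]
        simp
      by_cases hb : 0 ≤ b
      · by_cases htie : b = g
        · -- tie: one more 'B' step, then runB
          obtain ⟨f', rfl⟩ : ∃ f', f = f' + 1 := ⟨f - 1, by omega⟩
          have hstep2 : solveLoop (f' + 1) ['G'] b (g - 1) =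
              solveLoop f' ['G', 'B'] (b - 1) (g - 1) := by
            rw [solveLoop, if_pos (Or.inl (show b > 0 by omega)),
              if_pos (show b > g - 1 by omega),
              if_pos (Or.inr (show PySem.List.pyGet? ['G'] (-1) ≠ some 'B' by decide))]
            rfl
          rw [hstep, hstep2,
            runB (g - 1).toNat f' ['G', 'B'] (b - 1) (g - 1) rfl (by omega) (by omega) (by omega)
              (by decide) (by simp)]
          rw [if_neg (show ¬ max b 0 > max g 0 by omega), (show max b 0 = b by omega),
            (show max g 0 = g by omega)]
          rw [(show b.toNat = (g - 1).toNat + 1 by omega),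
            (show (b - 1 - (g - 1)).toNat = 0 by omega), (show (g - b).toNat = 0 by omega)]
          simp [pairRep]
        · -- strict girl majority
          rw [hstep, runG b.toNat f ['G'] b (g - 1) rfl (by omega) hb (by omega) (by decide)
            (by simp)]
          rw [if_neg (show ¬ max b 0 > max g 0 by omega), (show max b 0 = b by omega),
            (show max g 0 = g by omega)]
          rw [List.singleton_append, List.cons_append, swapShift 'G' 'B' b.toNat (g - 1 - b).toNat,
            (show (g - 1 - b).toNat + 1 = (g - b).toNat by omega)]
      · -- no boys at all
        rw [hstep, onlyG f ['G'] b (g - 1) (by omega) (by omega) (by omega) (by decide) (by simp)]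
        rw [if_neg (show ¬ max b 0 > max g 0 by omega), (show max b 0 = 0 by omega),
          (show max g 0 = g by omega)]
        simp only [pairRep, Int.toNat_zero, List.nil_append, List.singleton_append, Int.sub_zero]
        rw [(show g.toNat = (g - 1).toNat + 1 by omega), List.replicate_succ]
  · -- both counts ≤ 0: empty result on both sides
    rw [(show b.toNat + g.toNat = 0 by omega), if_neg (show ¬ max b 0 > max g 0 by omega),
      (show max b 0 = 0 by omega), (show max g 0 = 0 by omega)]
    simp [solveLoop, pairRep]
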